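-- pv_equiv track=rewrite | github.com/tesserae/tesserae-v5 | tesserae/utils/multitext.py | _get_str_match_id_to_multiresults
-- ===== SOURCE A (Python) =====
-- def _get_str_match_id_to_multiresults(raw_multiresults):
--     result = {}
--     for mr in raw_multiresults:
--         match_id = str(mr['match_id'])
--         if match_id in result:
--             result[match_id].append(mr)
--         else:
--             result[match_id] = [mr]
--     return result
-- ===== SOURCE B (Python) =====
-- def _get_str_match_id_to_multiresults(raw_multiresults):
--     mrs = list(raw_multiresults)
--     keys = dict.fromkeys(str(mr['match_id']) for mr in mrs)
--     return {k: [mr for mr in mrs if str(mr['match_id']) == k] for k in keys}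
-- ===== Notes on version B (the rewrite author's own statement) =====
-- stated objective: alternative
-- what changed: Replaces the one-pass dict bucketing (membership test + append/insert per item) with a gather-by-key scheme: dedupe the stringified match_ids once with dict.fromkeys, then build each group by filtering the materialized list per key.
import Mathlib
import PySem

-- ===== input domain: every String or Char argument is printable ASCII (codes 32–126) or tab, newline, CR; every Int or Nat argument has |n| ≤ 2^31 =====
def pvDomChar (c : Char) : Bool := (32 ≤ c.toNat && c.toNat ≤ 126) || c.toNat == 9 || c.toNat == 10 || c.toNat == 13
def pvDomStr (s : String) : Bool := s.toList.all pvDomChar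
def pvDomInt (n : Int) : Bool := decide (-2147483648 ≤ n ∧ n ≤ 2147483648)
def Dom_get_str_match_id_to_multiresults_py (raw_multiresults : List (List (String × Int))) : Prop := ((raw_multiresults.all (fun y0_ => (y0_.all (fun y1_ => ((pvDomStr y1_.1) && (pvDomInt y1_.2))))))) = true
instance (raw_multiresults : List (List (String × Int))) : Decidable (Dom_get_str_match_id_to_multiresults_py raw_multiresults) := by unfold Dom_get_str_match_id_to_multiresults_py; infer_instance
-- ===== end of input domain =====

-- B replaces A's one-pass dict bucketing by "dedupe keys, then filter per key"; same result (alternative decomposition, not faster).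


-- ===== PORT A =====
-- str(mr['match_id']): exact under Pre_ (key present); getD 0 is never reached inside Pre_
def pvKey (mr : List (String × Int)) : String :=
  PySem.Int.toStr (((PySem.Dict.mk mr).get? "match_id").getD 0)

def get_str_match_id_to_multiresults_py (raw_multiresults : List (List (String × Int))) : List (String × List (List (String × Int))) :=
  let result : PySem.Dict String (List (List (String × Int))) :=
    raw_multiresults.foldl
      (fun result mr =>
        let match_id := pvKey mr
        if result.contains match_id then
          result.modify match_id [] (fun g => g ++ [mr])
        else
          result.insert match_id [mr])
      PySem.Dict.empty
  result.items

-- ===== PORT B =====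
def get_str_match_id_to_multiresults_py_alt (raw_multiresults : List (List (String × Int))) : List (String × List (List (String × Int))) :=
  let keys := PySem.List.dedup (raw_multiresults.map pvKey)
  keys.map (fun k => (k, raw_multiresults.filter (fun mr => pvKey mr == k)))

-- ===== PRECONDITION & SPEC =====
-- Pre_ excludes exactly the inputs where mr['match_id'] raises KeyError (key absent from some mr)
def Pre_get_str_match_id_to_multiresults_py (raw_multiresults : List (List (String × Int))) : Prop :=
  (raw_multiresults.all (fun mr => (PySem.Dict.mk mr).contains "match_id")) = true
instance (raw_multiresults : List (List (String × Int))) : Decidable (Pre_get_str_match_id_to_multiresults_py raw_multiresults) := by unfold Pre_get_str_match_id_to_multiresults_py; infer_instance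

def pvWitness_get_str_match_id_to_multiresults_py : (List (List (String × Int))) :=
  [[("match_id", 1), ("score", 7)], [("match_id", 2)], [("match_id", 1), ("score", -3)]]

def Spec_get_str_match_id_to_multiresults_py (raw_multiresults : List (List (String × Int))) (out : List (String × List (List (String × Int)))) : Prop := out = get_str_match_id_to_multiresults_py_alt raw_multiresults
instance (raw_multiresults : List (List (String × Int))) (out : List (String × List (List (String × Int)))) : Decidable (Spec_get_str_match_id_to_multiresults_py raw_multiresults out) := by unfold Spec_get_str_match_id_to_multiresults_py; infer_instance

-- ===== CLAIM (what is proved, stated in full; the proofs are below) =====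
def Claim_equal_get_str_match_id_to_multiresults_py : Prop := ∀ (raw_multiresults : List (List (String × Int))), Dom_get_str_match_id_to_multiresults_py raw_multiresults → Pre_get_str_match_id_to_multiresults_py raw_multiresults → Spec_get_str_match_id_to_multiresults_py raw_multiresults (get_str_match_id_to_multiresults_py raw_multiresults)

-- ===== LEMMAS AND PROOFS =====

-- on a fresh key, A's insert is the same dict operation as an appending modify
theorem pv_insert_eq_modify {ν : Type} (d : PySem.Dict String (List ν)) (k : String) (x : ν)
    (hc : d.contains k = false) : d.insert k [x] = d.modify k [] (fun g => g ++ [x]) := by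
  simp [PySem.Dict.insert, PySem.Dict.modify, hc, PySem.Dict.getD_of_not_contains]

-- projecting B's filter out of the key-tagged filter A's dict lemma produces
theorem pv_map_filter (raw : List (List (String × Int))) (c : String) :
    ((raw.map (fun mr => (pvKey mr, mr))).filter (fun p => p.1 == c)).map (fun p => p.2)
      = raw.filter (fun mr => pvKey mr == c) := by
  induction raw with
  | nil => rfl
  | cons h t ih => by_cases hk : pvKey h == c <;> simp [hk, ih]

-- A's branchy fold collapses to a uniform modify-fold
theorem pv_fold_eq_modify (l : List (List (String × Int)))
    (d : PySem.Dict String (List (List (String × Int)))) :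
    l.foldl
      (fun result mr =>
        let match_id := pvKey mr
        if result.contains match_id then
          result.modify match_id [] (fun g => g ++ [mr])
        else
          result.insert match_id [mr]) d
    = l.foldl (fun result mr => result.modify (pvKey mr) [] (fun g => g ++ [mr])) d := by
  induction l generalizing d with
  | nil => rfl
  | cons mr t ih =>
    simp only [List.foldl_cons]
    by_cases h : d.contains (pvKey mr) = true
    · simp [h, ih]
    · simp only [Bool.not_eq_true] at h
      simp [h, pv_insert_eq_modify d (pvKey mr) mr h, ih]

theorem get_str_match_id_to_multiresults_py_spec : Claim_equal_get_str_match_id_to_multiresults_py := by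
  intro raw _ _
  show get_str_match_id_to_multiresults_py raw = get_str_match_id_to_multiresults_py_alt raw
  unfold get_str_match_id_to_multiresults_py get_str_match_id_to_multiresults_py_alt
  rw [pv_fold_eq_modify]
  set d := raw.foldl (fun result mr => result.modify (pvKey mr) [] (fun g => g ++ [mr])) PySem.Dict.empty with hd
  have hnd : d.keys.Nodup := by
    rw [hd]
    exact PySem.Dict.nodup_keys_foldl_modify_key raw pvKey [] (fun _ mr => (fun g => g ++ [mr])) PySem.Dict.empty PySem.Dict.nodup_keys_empty
  have hkeys : d.keys = PySem.List.dedup (raw.map pvKey) := by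
    rw [hd, PySem.Dict.keys_foldl_modify_key, PySem.Dict.keys_empty, PySem.Set.update_nil_left, PySem.List.dedup_eq_ofList]
  have hget : ∀ c, d.getD c [] = raw.filter (fun mr => pvKey mr == c) := by
    intro c
    have := PySem.Dict.getD_foldl_modify_append (raw.map (fun mr => (pvKey mr, mr))) (PySem.Dict.empty (κ := String) (ν := List (List (String × Int)))) c
    rw [List.foldl_map] at this
    rw [← hd] at this
    rw [this, pv_map_filter]
    simp
  rw [PySem.Dict.items_eq_map_keys d hnd [], hkeys]
  simp only [hget]
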